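-- pv_equiv track=rewrite | github.com/pablorecio/resistencia-1812 | resistencia/contest/pairing.py | correct_pairing
-- ===== SOURCE A (Python) =====
-- def correct_pairing(matchs, back_round=False):
--     """This function verifies the correction of a pairing.
--
--     A pairing is not correct if two teams plays more than one time
--     if it has no back round, or more than two times if it has back round.
--     """
--     x = len(matchs)
--     y = len(matchs[0])
--     band = True
--     for i in range(x):
--         for j in range(y):
--             element = matchs[i][j]
--             aux_list = [element]
--             if back_round:
--                 element_i = element[1], element[0]
--                 aux_list.append(element_i)
--             aux_set = set(aux_list)
--             for k in range(x):
--                 s = set(matchs[k])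
--                 res = s.intersection(aux_set)
--                 maxi = 0
--                 if i == k:
--                     maxi = 1
--                 if len(res) > maxi:
--                     band = False
--
--     return band
-- ===== SOURCE B (Python) =====
-- def correct_pairing(matchs, back_round=False):
--     """Index-based re-check: count, for every match, in how many rounds it
--     appears; a pairing is bad iff some checked match appears in more than one
--     round, or (with back round) its distinct reverse appears anywhere."""
--     y = len(matchs[0])
--     rounds_with = {}
--     for row in matchs:
--         for e in set(row):
--             rounds_with[e] = rounds_with.get(e, 0) + 1
--     for row in matchs:
--         for e in row[:y]:
--             if rounds_with[e] > 1:
--                 return False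
--             if back_round:
--                 rev = (e[1], e[0])
--                 if rev != e and rev in rounds_with:
--                     return False
--     return True
-- ===== Notes on version B (the rewrite author's own statement) =====
-- stated objective: faster
-- what changed: A rechecks every match against a freshly built set of every round for every match (four nested loops); B makes one counting pass that indexes each match by the number of rounds it appears in, then decides each match with two O(1) dictionary lookups.
-- outside the precondition, e.g. on correct_pairing([], False): A raises IndexError, B raises IndexError
import Mathlib
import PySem

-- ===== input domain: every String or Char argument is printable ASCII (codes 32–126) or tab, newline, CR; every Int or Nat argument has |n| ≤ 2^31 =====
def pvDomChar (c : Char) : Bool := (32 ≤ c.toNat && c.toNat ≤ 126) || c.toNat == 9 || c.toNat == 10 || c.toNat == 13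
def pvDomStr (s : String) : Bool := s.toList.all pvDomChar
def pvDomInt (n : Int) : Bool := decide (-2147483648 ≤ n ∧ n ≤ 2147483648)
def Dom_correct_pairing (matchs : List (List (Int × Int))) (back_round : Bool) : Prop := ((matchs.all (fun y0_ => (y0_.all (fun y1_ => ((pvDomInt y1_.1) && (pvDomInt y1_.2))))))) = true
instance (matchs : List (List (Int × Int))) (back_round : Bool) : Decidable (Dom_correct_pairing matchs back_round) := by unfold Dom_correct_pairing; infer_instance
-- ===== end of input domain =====

-- B replaces A's quadruply nested scan by one counting pass over the rounds plus one
-- linear check per match (objective: faster, asymptotic); return value only, no mutation.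

-- ===== PORT A =====
-- Literal port of A.  matchs[0] is headD [] (Pre_ excludes matchs = []); the index
-- accesses matchs[i], matchs[i][j] use getD with a dummy default — Pre_ guarantees the
-- indices (produced by range) are in range, where Python's indexing returns the element.
def correct_pairing (matchs : List (List (Int × Int))) (back_round : Bool) : Bool :=
  let x := matchs.length
  let y := (matchs.headD []).length
  (List.range x).foldl (fun band i =>
    (List.range y).foldl (fun band j =>
      let element := (matchs.getD i []).getD j (0, 0)
      let aux_list := if back_round then [element, (element.2, element.1)] else [element]
      let aux_set := PySem.Set.ofList aux_list
      (List.range x).foldl (fun band k =>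
        let s := PySem.Set.ofList (matchs.getD k [])
        let res := PySem.Set.inter s aux_set
        let maxi : Int := if i = k then 1 else 0
        if maxi < PySem.Set.len res then false else band) band) band) true

-- ===== PORT B =====
-- Port of Source B.  rounds_with[e] = in how many rounds the match e appears (each round's
-- distinct matches counted once, via set(row)); row[:y] with y ≥ 0 is row.take y;
-- the two early 'return False' become the all-combinator over the same traversal.
def correct_pairing_alt (matchs : List (List (Int × Int))) (back_round : Bool) : Bool :=
  let y := (matchs.headD []).length
  let rounds_with : PySem.Dict (Int × Int) Int :=
    matchs.foldl (fun d row =>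
      (PySem.Set.ofList row).foldl (fun d e => d.modify e 0 (· + 1)) d) PySem.Dict.empty
  matchs.all (fun row =>
    (row.take y).all (fun e =>
      if 1 < rounds_with.getD e 0 then false
      else if back_round && ((e.2, e.1) != e) && rounds_with.contains (e.2, e.1) then false
      else true))

-- ===== PRECONDITION & SPEC =====
-- A raises IndexError on matchs = [] (matchs[0]) and whenever some round is shorter than
-- the first one (matchs[i][j] with j < len(matchs[0])); exactly those inputs are excluded.
def Pre_correct_pairing (matchs : List (List (Int × Int))) (back_round : Bool) : Prop :=
  matchs ≠ [] ∧ ∀ row ∈ matchs, (matchs.headD []).length ≤ row.length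
instance (matchs : List (List (Int × Int))) (back_round : Bool) : Decidable (Pre_correct_pairing matchs back_round) := by unfold Pre_correct_pairing; infer_instance
def pvWitness_correct_pairing : (List (List (Int × Int))) × Bool := ([[(1, 2)], [(3, 4)]], true)

def Spec_correct_pairing (matchs : List (List (Int × Int))) (back_round : Bool) (out : Bool) : Prop := out = correct_pairing_alt matchs back_round
instance (matchs : List (List (Int × Int))) (back_round : Bool) (out : Bool) : Decidable (Spec_correct_pairing matchs back_round out) := by unfold Spec_correct_pairing; infer_instance

-- ===== CLAIM (what is proved, stated in full; the proofs are below) =====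
def Claim_equal_correct_pairing : Prop := ∀ (matchs : List (List (Int × Int))) (back_round : Bool), Dom_correct_pairing matchs back_round → Pre_correct_pairing matchs back_round → Spec_correct_pairing matchs back_round (correct_pairing matchs back_round)

-- ===== LEMMAS AND PROOFS =====

-- the "bad" property of one checked match e: it appears in more than one round, or
-- (with back round) its distinct reverse appears in some round
def pvBadE (m : List (List (Int × Int))) (br : Bool) (e : Int × Int) : Prop :=
  1 < m.countP (fun r => decide (e ∈ r)) ∨
  (br = true ∧ (e.2, e.1) ≠ e ∧ ∃ r ∈ m, (e.2, e.1) ∈ r)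

lemma pv_foldl_if_all {α : Type} (l : List α) (P : α → Prop) [DecidablePred P] (b : Bool) :
    l.foldl (fun b a => if P a then false else b) b = (b && l.all fun a => !(decide (P a))) := by
  induction l generalizing b with
  | nil => simp
  | cons a t ih =>
    simp only [List.foldl_cons, List.all_cons, ih]
    by_cases h : P a <;> simp [h]

lemma pv_foldl_and_all {α : Type} (l : List α) (f : α → Bool) (b : Bool) :
    l.foldl (fun b a => b && f a) b = (b && l.all f) := by
  induction l generalizing b with
  | nil => simp
  | cons a t ih =>
    simp only [List.foldl_cons, List.all_cons, ih, Bool.and_assoc]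

lemma pv_A_char (m : List (List (Int × Int))) (br : Bool) :
    correct_pairing m br = true ↔
      ∀ i < m.length, ∀ j < (m.headD []).length, ∀ k < m.length,
        ¬ ((if i = k then (1 : Int) else 0) <
            PySem.Set.len (PySem.Set.inter (PySem.Set.ofList (m.getD k []))
              (PySem.Set.ofList
                (if br then [(m.getD i []).getD j (0, 0),
                             (((m.getD i []).getD j (0, 0)).2, ((m.getD i []).getD j (0, 0)).1)]
                 else [(m.getD i []).getD j (0, 0)])))) := by
  simp only [correct_pairing]
  simp only [pv_foldl_if_all, pv_foldl_and_all]
  simp [List.all_eq_true, List.mem_range]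

lemma pv_count_ofList (r : List (Int × Int)) (e : Int × Int) :
    (PySem.Set.ofList r).count e = if e ∈ r then 1 else 0 := by
  by_cases h : e ∈ r
  · have hm : e ∈ PySem.Set.ofList r := (PySem.Set.mem_ofList r e).mpr h
    have h1 : (PySem.Set.ofList r).count e ≤ 1 :=
      List.nodup_iff_count_le_one.mp (PySem.Set.nodup_ofList r) e
    have h2 : 0 < (PySem.Set.ofList r).count e := List.count_pos_iff.mpr hm
    simp only [h, if_true]
    omega
  · have hm : e ∉ PySem.Set.ofList r := fun hm => h ((PySem.Set.mem_ofList r e).mp hm)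
    simp [h, List.count_eq_zero.mpr hm]

lemma pv_countP_pair (s : List (Int × Int)) (e f : Int × Int) (hef : e ≠ f) :
    s.countP (fun x => x == e || x == f) = s.count e + s.count f := by
  induction s with
  | nil => simp
  | cons a t ih =>
    by_cases hae : a = e <;> by_cases haf : a = f
    · exact absurd (hae.symm.trans haf) hef
    all_goals simp [hae, haf, ih, hef, Ne.symm hef] <;> omega

lemma pv_len_inter (s t : List (Int × Int)) :
    PySem.Set.len (PySem.Set.inter s t) = (s.countP (fun x => t.contains x) : Int) := by
  simp [PySem.Set.len, PySem.Set.inter, List.countP_eq_length_filter]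

lemma pv_contains_single (e x : Int × Int) : [e].contains x = (x == e) := by
  rw [Bool.eq_iff_iff]
  simp

lemma pv_contains_pair (e f x : Int × Int) : [e, f].contains x = (x == e || x == f) := by
  rw [Bool.eq_iff_iff]
  simp

lemma pv_lenInter_single (r : List (Int × Int)) (e : Int × Int) :
    PySem.Set.len (PySem.Set.inter (PySem.Set.ofList r) (PySem.Set.ofList [e]))
      = if e ∈ r then 1 else 0 := by
  have hof : PySem.Set.ofList [e] = [e] := rfl
  rw [pv_len_inter, hof,
    List.countP_congr (fun x _ => by rw [pv_contains_single]),
    ← List.count_eq_countP, pv_count_ofList]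
  split <;> rfl

lemma pv_lenInter_pair (r : List (Int × Int)) (e f : Int × Int) (hef : e ≠ f) :
    PySem.Set.len (PySem.Set.inter (PySem.Set.ofList r) (PySem.Set.ofList [e, f]))
      = (if e ∈ r then 1 else 0) + (if f ∈ r then 1 else 0) := by
  have hof : PySem.Set.ofList [e, f] = [e, f] := by
    simp [PySem.Set.ofList, PySem.Set.add, PySem.Set.empty, Ne.symm hef]
  rw [pv_len_inter, hof,
    List.countP_congr (fun x _ => by rw [pv_contains_pair]),
    pv_countP_pair _ _ _ hef, pv_count_ofList, pv_count_ofList]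
  push_cast
  split <;> split <;> simp

lemma pv_countP_pos {α : Type} (m : List α) (p : α → Bool) :
    0 < m.countP p ↔ ∃ k, ∃ hk : k < m.length, p m[k] = true := by
  rw [List.countP_pos_iff]
  constructor
  · rintro ⟨a, ha, hp⟩
    obtain ⟨k, hk, rfl⟩ := List.mem_iff_getElem.mp ha
    exact ⟨k, hk, hp⟩
  · rintro ⟨k, hk, hp⟩
    exact ⟨m[k], List.getElem_mem hk, hp⟩

lemma pv_countP_ge_two {α : Type} (m : List α) (p : α → Bool) (i : Nat) (hi : i < m.length)
    (hp : p m[i] = true) :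
    1 < m.countP p ↔ ∃ k, ∃ hk : k < m.length, k ≠ i ∧ p m[k] = true := by
  induction m generalizing i with
  | nil => simp at hi
  | cons a t ih =>
    match i with
    | 0 =>
      simp only [List.getElem_cons_zero] at hp
      rw [List.countP_cons, if_pos hp]
      constructor
      · intro h
        have : 0 < t.countP p := by omega
        obtain ⟨k, hk, hpk⟩ := (pv_countP_pos t p).mp this
        exact ⟨k + 1, by simpa using hk, by omega, by simpa using hpk⟩
      · rintro ⟨k, hk, hne, hpk⟩
        match k with
        | 0 => omega
        | k + 1 =>
          have : 0 < t.countP p :=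
            (pv_countP_pos t p).mpr ⟨k, by simpa using hk, by simpa using hpk⟩
          omega
    | i + 1 =>
      have hi' : i < t.length := by simpa using hi
      simp only [List.getElem_cons_succ] at hp
      rw [List.countP_cons]
      by_cases hpa : p a = true
      · rw [if_pos hpa]
        have : 0 < t.countP p := (pv_countP_pos t p).mpr ⟨i, hi', hp⟩
        constructor
        · intro _
          exact ⟨0, by simp, by omega, by simpa using hpa⟩
        · intro _
          omega
      · rw [if_neg hpa, Nat.add_zero]
        rw [ih i hi' hp]
        constructor
        · rintro ⟨k, hk, hne, hpk⟩
          exact ⟨k + 1, by simpa using hk, by omega, by simpa using hpk⟩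
        · rintro ⟨k, hk, hne, hpk⟩
          match k with
          | 0 => exact absurd (by simpa using hpk) hpa
          | k + 1 =>
            exact ⟨k, by simpa using hk, by omega, by simpa using hpk⟩

lemma pv_count_flat (m : List (List (Int × Int))) (e : Int × Int) :
    (m.flatMap fun r => PySem.Set.ofList r).count e = m.countP (fun r => decide (e ∈ r)) := by
  induction m with
  | nil => simp
  | cons r t ih =>
    rw [List.flatMap_cons, List.count_append, List.countP_cons, ih, pv_count_ofList]
    by_cases h : e ∈ r <;> simp [h] <;> omega

-- characterisation of B ----------------------------------------------------
lemma pv_dict_eq (m : List (List (Int × Int))) :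
    (m.foldl (fun d row =>
        (PySem.Set.ofList row).foldl (fun d e => d.modify e 0 (· + 1)) d) PySem.Dict.empty)
      = PySem.Dict.counter (m.flatMap fun r => PySem.Set.ofList r) := by
  rw [PySem.Dict.counter_eq_foldl, List.foldl_flatMap]

lemma pv_B_body (m : List (List (Int × Int))) (br : Bool) (e : Int × Int) :
    ((if (1 : Int) < ((m.countP (fun r => decide (e ∈ r)) : Nat) : Int) then false
      else if br && ((e.2, e.1) != e) && (m.flatMap fun r => PySem.Set.ofList r).contains (e.2, e.1) then false
      else true) = true) ↔ ¬ pvBadE m br e := by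
  have hc2 : (br && ((e.2, e.1) != e) && (m.flatMap fun r => PySem.Set.ofList r).contains (e.2, e.1)) = true
      ↔ (br = true ∧ (e.2, e.1) ≠ e ∧ ∃ r ∈ m, (e.2, e.1) ∈ r) := by
    simp [List.contains_iff_mem, and_assoc]
  by_cases h1 : 1 < m.countP (fun r => decide (e ∈ r))
  · rw [if_pos (by exact_mod_cast h1)]
    simp [pvBadE, h1]
  · rw [if_neg (by exact_mod_cast h1)]
    cases hb : (br && ((e.2, e.1) != e) && (m.flatMap fun r => PySem.Set.ofList r).contains (e.2, e.1)) with
    | true =>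
      simp only [hb]
      simp [pvBadE, hc2.mp hb]
    | false =>
      have : ¬ (br = true ∧ (e.2, e.1) ≠ e ∧ ∃ r ∈ m, (e.2, e.1) ∈ r) := by
        rw [← hc2, hb]; simp
      simp [pvBadE, h1, this]

lemma pv_B_char (m : List (List (Int × Int))) (br : Bool)
    (hrows : ∀ row ∈ m, (m.headD []).length ≤ row.length) :
    correct_pairing_alt m br = true ↔
      ∀ i < m.length, ∀ j < (m.headD []).length,
        ¬ pvBadE m br ((m.getD i []).getD j (0, 0)) := by
  have hmain : correct_pairing_alt m br = true ↔
      ∀ row ∈ m, ∀ e ∈ row.take (m.headD []).length, ¬ pvBadE m br e := by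
    simp only [correct_pairing_alt, pv_dict_eq, PySem.Dict.getD_counter, pv_count_flat,
      PySem.Dict.contains_counter, List.all_eq_true]
    constructor
    · intro h row hrow e he
      exact (pv_B_body m br e).mp (h row hrow e he)
    · intro h row hrow e he
      exact (pv_B_body m br e).mpr (h row hrow e he)
  rw [hmain]
  constructor
  · intro h i hi j hj
    have hylen : (m.headD []).length ≤ m[i].length := hrows _ (List.getElem_mem hi)
    have hj' : j < (m[i].take (m.headD []).length).length := by
      simp only [List.length_take]; omega
    have := h m[i] (List.getElem_mem hi) _ (List.getElem_mem hj')
    rw [List.getElem_take] at this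
    rw [List.getD_eq_getElem m [] hi, List.getD_eq_getElem _ _ (by omega)]
    exact this
  · intro h row hrowmem e he
    obtain ⟨i, hi, rfl⟩ := List.mem_iff_getElem.mp hrowmem
    obtain ⟨j, hj, rfl⟩ := List.mem_iff_getElem.mp he
    have hj2 : j < (m.headD []).length := by
      simp only [List.length_take] at hj; omega
    have hylen : (m.headD []).length ≤ m[i].length := hrows _ (List.getElem_mem hi)
    have := h i hi j hj2
    rw [List.getD_eq_getElem m [] hi, List.getD_eq_getElem _ _ (by omega : j < m[i].length)] at this
    rw [List.getElem_take]
    exact this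

-- the crux: A's inner scan over k, for one fixed checked match, says exactly pvBadE
lemma pv_core (m : List (List (Int × Int))) (e : Int × Int) (i : Nat) (hi : i < m.length)
    (he : e ∈ m[i]) :
    (∀ k < m.length,
        ¬ ((if i = k then (1 : Int) else 0) < (if e ∈ m.getD k [] then (1 : Int) else 0)))
      ↔ ¬ (1 < m.countP (fun r => decide (e ∈ r))) := by
  rw [pv_countP_ge_two m _ i hi (by simp [he])]
  constructor
  · intro h
    rintro ⟨k, hk, hne, hpk⟩
    have hmem : e ∈ m.getD k [] := by
      rw [List.getD_eq_getElem m [] hk]; exact of_decide_eq_true hpk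
    have := h k hk
    rw [if_neg (fun hik => hne (hik.symm)), if_pos hmem] at this
    omega
  · intro h k hk
    by_cases hik : i = k
    · subst hik
      rw [if_pos rfl]
      split <;> omega
    · rw [if_neg hik]
      by_cases hmem : e ∈ m.getD k []
      · exfalso
        refine h ⟨k, hk, fun hki => hik hki.symm, ?_⟩
        rw [List.getD_eq_getElem m [] hk] at hmem
        simpa using hmem
      · rw [if_neg hmem]
        omega

lemma pv_crux (m : List (List (Int × Int))) (br : Bool)
    (i j : Nat) (hi : i < m.length) (hj : j < (m.headD []).length)
    (hrows : ∀ row ∈ m, (m.headD []).length ≤ row.length) :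
    (∀ k < m.length,
        ¬ ((if i = k then (1 : Int) else 0) <
            PySem.Set.len (PySem.Set.inter (PySem.Set.ofList (m.getD k []))
              (PySem.Set.ofList
                (if br then [(m.getD i []).getD j (0, 0),
                             (((m.getD i []).getD j (0, 0)).2, ((m.getD i []).getD j (0, 0)).1)]
                 else [(m.getD i []).getD j (0, 0)])))))
      ↔ ¬ pvBadE m br ((m.getD i []).getD j (0, 0)) := by
  have hylen : (m.headD []).length ≤ m[i].length := hrows _ (List.getElem_mem hi)
  have he : (m.getD i []).getD j (0, 0) ∈ m[i] := by
    rw [List.getD_eq_getElem m [] hi, List.getD_eq_getElem _ _ (by omega : j < m[i].length)]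
    exact List.getElem_mem _
  set e := (m.getD i []).getD j (0, 0) with hedef
  cases br with
  | false =>
    simp only [Bool.false_eq_true, if_false]
    simp only [pv_lenInter_single]
    rw [pv_core m e i hi he]
    unfold pvBadE
    simp
  | true =>
    simp only [if_true]
    by_cases hrv : ((e.2, e.1) : Int × Int) = e
    · have hof : PySem.Set.ofList [e, (e.2, e.1)] = PySem.Set.ofList [e] := by
        rw [hrv]
        simp [PySem.Set.ofList, PySem.Set.add, PySem.Set.empty]
      simp only [hof, pv_lenInter_single]
      rw [pv_core m e i hi he]
      unfold pvBadE
      simp [hrv]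
    · simp only [pv_lenInter_pair _ _ _ (fun h => hrv h.symm)]
      unfold pvBadE
      rw [pv_countP_ge_two m _ i hi (by simp [he])]
      constructor
      · intro h
        rintro (⟨k, hk, hne, hpk⟩ | ⟨-, -, r, hr, hrvr⟩)
        · have := h k hk
          rw [if_neg (fun hik => hne (hik.symm))] at this
          have hmem : e ∈ m.getD k [] := by
            rw [List.getD_eq_getElem m [] hk]; exact of_decide_eq_true hpk
          rw [if_pos hmem] at this
          split at this <;> omega
        · obtain ⟨k, hk, rfl⟩ := List.mem_iff_getElem.mp hr
          have := h k hk
          have hmem : (e.2, e.1) ∈ m.getD k [] := by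
            rw [List.getD_eq_getElem m [] hk]; exact hrvr
          rw [if_pos hmem] at this
          by_cases hik : i = k
          · rcases hik with rfl
            rw [if_pos rfl] at this
            have hmeme : e ∈ m.getD i [] := by
              rw [List.getD_eq_getElem m [] hi]; exact he
            rw [if_pos hmeme] at this
            omega
          · rw [if_neg hik] at this
            split at this <;> omega
      · intro h k hk
        have h1 : ¬ ∃ k, ∃ hk : k < m.length, k ≠ i ∧ decide (e ∈ m[k]) = true :=
          fun x => h (Or.inl x)
        have h2 : ¬ (true = true ∧ (e.2, e.1) ≠ e ∧ ∃ r ∈ m, (e.2, e.1) ∈ r) :=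
          fun x => h (Or.inr x)
        by_cases hmem2 : (e.2, e.1) ∈ m.getD k []
        · exfalso
          refine h2 ⟨rfl, hrv, m.getD k [], ?_, hmem2⟩
          rw [List.getD_eq_getElem m [] hk]
          exact List.getElem_mem hk
        · rw [if_neg hmem2]
          by_cases hmem1 : e ∈ m.getD k []
          · by_cases hik : i = k
            · rw [if_pos hik, if_pos hmem1]
              omega
            · exfalso
              refine h1 ⟨k, hk, fun hki => hik hki.symm, ?_⟩
              rw [List.getD_eq_getElem m [] hk] at hmem1
              simpa using hmem1
          · rw [if_neg hmem1]
            split <;> omega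

-- ===== VERDICT (by name: the statement is the Claim_ definition above) =====
theorem correct_pairing_spec : Claim_equal_correct_pairing := by
  intro m br _ hpre
  obtain ⟨hne, hrows⟩ := hpre
  show correct_pairing m br = correct_pairing_alt m br
  rw [Bool.eq_iff_iff, pv_A_char, pv_B_char m br hrows]
  constructor
  · intro h i hi j hj
    exact (pv_crux m br i j hi hj hrows).1 (h i hi j hj)
  · intro h i hi j hj
    exact (pv_crux m br i j hi hj hrows).2 (h i hi j hj)
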